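-- pv_equiv track=rewrite | github.com/ChildMindInstitute/questionnaire-diagnosis | topology/boundary_matrix.py | lower_dimensions_index
-- ===== SOURCE A (Python) =====
-- from itertools import combinations
--
-- def lower_dimensions_index(vector, index_dict):
--     """
--     Function to index all lower-dimension structures needed for
--     the most complex structures in a boundary matrix.
--
--     Parameters
--     ----------
--     vector : list
--
--     index_dict : dictionary of {vector (list): index (int)} {key: value} pairs
--
--     Returns
--     -------
--     index_dict : dictionary of {vector (list): index (int)} {key: value} pairs
--     """
--     if str(vector) in index_dict or (type(vector) == "int" and vector in index_dict):
--         return(index_dict)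
--     else:
--         for v in list(combinations(vector, len(vector) - 1)):
--             lv = list(v)
--             if len(lv) > 1:
--                 lower_dimensions_index(lv, index_dict)
--     index_dict[str(vector)] = len(index_dict)
--     return(index_dict)
-- ===== SOURCE B (Python) =====
-- def lower_dimensions_index(vector, index_dict):
--     # Iterative post-order DFS with an explicit stack instead of recursion.
--     stack = [(vector, False)]
--     while stack:
--         v, processed = stack.pop()
--         if processed:
--             index_dict[str(v)] = len(index_dict)
--         elif str(v) not in index_dict:
--             stack.append((v, True))
--             n = len(v)
--             # children = combinations(v, n-1), pushed in reverse so they pop left-to-right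
--             for i in range(n):
--                 child = v[:i] + v[i + 1:]
--                 if len(child) > 1:
--                     stack.append((child, False))
--     return index_dict
-- ===== Notes on version B (the rewrite author's own statement) =====
-- stated objective: alternative
-- what changed: Replaces A's recursion (with memoized early return) by an explicit-stack post-order DFS: each vector is pushed unprocessed, skipped if already indexed, otherwise its >1-length sub-combinations are pushed above a processed marker, and the index is assigned when the marker pops; the dead `type(vector) == "int"` branch is dropped.
-- crash fix: On an empty vector whose key '[]' is not already in index_dict, A raises ValueError (combinations(vector, -1)); B returns index_dict with '[]' appended at index len(index_dict). — e.g. on lower_dimensions_index([], []): A raises ValueError, B returns [("[]", 0)]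
import Mathlib
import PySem

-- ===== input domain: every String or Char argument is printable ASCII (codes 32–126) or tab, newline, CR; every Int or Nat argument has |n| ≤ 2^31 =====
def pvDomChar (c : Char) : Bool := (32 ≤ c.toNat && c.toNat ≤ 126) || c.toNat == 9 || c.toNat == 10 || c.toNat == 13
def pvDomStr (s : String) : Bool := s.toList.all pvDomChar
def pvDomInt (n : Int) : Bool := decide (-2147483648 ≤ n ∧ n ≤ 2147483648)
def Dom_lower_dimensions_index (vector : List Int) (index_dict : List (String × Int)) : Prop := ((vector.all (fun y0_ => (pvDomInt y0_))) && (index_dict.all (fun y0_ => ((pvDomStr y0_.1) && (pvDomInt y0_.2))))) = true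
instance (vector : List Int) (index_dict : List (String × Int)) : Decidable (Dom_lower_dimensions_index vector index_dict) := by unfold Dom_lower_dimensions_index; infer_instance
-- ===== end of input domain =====

-- B replaces A's recursion by an explicit-stack post-order DFS (same return value; like A, B mutates
-- index_dict in place in Python — the equivalence proved here is about the returned dict).

-- ===== PORT A =====
-- shared dict/str helpers (exact Python semantics via PySem.Dict; str(list) printed as "[a, b]")
def pyStr (v : List Int) : String := "[" ++ String.intercalate ", " (v.map PySem.Int.toStr) ++ "]"
def dMem (d : List (String × Int)) (k : String) : Bool := (PySem.Dict.mk d).contains k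
def dIns (d : List (String × Int)) (k : String) (n : Int) : List (String × Int) := ((PySem.Dict.mk d).insert k n).items

-- list(combinations(vector, len(vector)-1)): the sublists omitting index i, for i = n-1 down to 0
def csA (v : List Int) : List (List Int) :=
  ((List.range v.length).map (fun i => v.take i ++ v.drop (i + 1))).reverse

-- A's recursion, with fuel = vector.length as a totality guard (each recursive call is on a child one
-- element shorter, so the fuel is exact; the dead Python branch `type(vector) == "int" and …` is
-- statically False — comparing a type to a string — and is dropped)
def A_core : Nat → List Int → List (String × Int) → List (String × Int)
  | 0, vector, d =>
      if dMem d (pyStr vector) then d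
      else dIns d (pyStr vector) (Int.ofNat d.length)
  | n + 1, vector, d =>
      if dMem d (pyStr vector) then d
      else
        let d' := (csA vector).foldl (fun acc lv => if lv.length > 1 then A_core n lv acc else acc) d
        dIns d' (pyStr vector) (Int.ofNat d'.length)

def lower_dimensions_index (vector : List Int) (index_dict : List (String × Int)) : List (String × Int) :=
  A_core vector.length vector index_dict

-- ===== PORT B =====
-- the for-loop over range(n) that pushes the >1-length children onto the stack (head = top of stack)
def pushChildren (v : List Int) (st : List (List Int × Bool)) : List (List Int × Bool) :=
  (List.range v.length).foldl (fun st i =>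
    if (v.take i ++ v.drop (i + 1)).length > 1 then (v.take i ++ v.drop (i + 1), false) :: st
    else st) st

-- termination measure for the stack loop
def wt : List Int × Bool → Nat
  | (v, false) => 2 * Nat.factorial (v.length + 1)
  | (_, true) => 1

def stackW (st : List (List Int × Bool)) : Nat := (st.map wt).sum

theorem stackW_cons (p : List Int × Bool) (st : List (List Int × Bool)) :
    stackW (p :: st) = wt p + stackW st := by
  simp [stackW]

theorem stackW_push_le (v : List Int) (st : List (List Int × Bool)) :
    stackW (pushChildren v st) ≤ v.length * (2 * Nat.factorial v.length) + stackW st := by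
  unfold pushChildren
  have key : ∀ (l : List Nat) (st : List (List Int × Bool)), (∀ i ∈ l, i < v.length) →
      stackW (l.foldl (fun st i =>
        if (v.take i ++ v.drop (i + 1)).length > 1 then (v.take i ++ v.drop (i + 1), false) :: st
        else st) st)
        ≤ l.length * (2 * Nat.factorial v.length) + stackW st := by
    intro l
    induction l with
    | nil => intro st _; simp
    | cons i l ih =>
      intro st hmem
      have hi : i < v.length := hmem i (by simp)
      have hrest : ∀ j ∈ l, j < v.length := fun j hj => hmem j (by simp [hj])
      simp only [List.foldl_cons]
      refine le_trans (ih _ hrest) ?_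
      by_cases h : (v.take i ++ v.drop (i + 1)).length > 1
      · have hlen : (v.take i ++ v.drop (i + 1)).length = v.length - 1 := by
          simp [List.length_take, List.length_drop]; omega
        have hwt : wt ((v.take i ++ v.drop (i + 1)), false) = 2 * Nat.factorial v.length := by
          simp only [wt, hlen]
          congr 2
          omega
        simp only [h, if_pos, stackW_cons, hwt, List.length_cons]
        ring_nf
        omega
      · simp only [if_neg h, List.length_cons]
        nlinarith [Nat.factorial_pos v.length, stackW st]
  refine le_trans (key (List.range v.length) st (by simp)) ?_
  simp

def B_loop : List (List Int × Bool) → List (String × Int) → List (String × Int)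
  | [], d => d
  | (v, true) :: rest, d => B_loop rest (dIns d (pyStr v) (Int.ofNat d.length))
  | (v, false) :: rest, d =>
      if dMem d (pyStr v) then B_loop rest d
      else B_loop (pushChildren v ((v, true) :: rest)) d
termination_by st _ => stackW st
decreasing_by
  · simp [stackW_cons, wt]
  · simp only [stackW_cons, wt]
    have := Nat.factorial_pos (v.length + 1)
    omega
  · refine lt_of_le_of_lt (stackW_push_le v ((v, true) :: rest)) ?_
    simp only [stackW_cons, wt, Nat.factorial_succ]
    have := Nat.factorial_pos v.length
    nlinarith

def lower_dimensions_index_alt (vector : List Int) (index_dict : List (String × Int)) : List (String × Int) :=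
  B_loop [(vector, false)] index_dict

-- ===== PRECONDITION & SPEC =====
-- Pre_ excludes exactly the inputs where Python A raises ValueError: an empty vector whose key "[]"
-- is not already in the dict (combinations(vector, -1) raises).
def Pre_lower_dimensions_index (vector : List Int) (index_dict : List (String × Int)) : Prop :=
  vector ≠ [] ∨ ∃ p ∈ index_dict, p.1 = "[]"
instance (vector : List Int) (index_dict : List (String × Int)) : Decidable (Pre_lower_dimensions_index vector index_dict) := by unfold Pre_lower_dimensions_index; infer_instance

def pvWitness_lower_dimensions_index : List Int × (List (String × Int)) := ([1, 2, 3], [("x", 5)])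

-- A raises ValueError on an empty vector whose key "[]" is absent from the dict; B returns the dict
-- with "[]" appended at index len(index_dict).
def Raises_lower_dimensions_index (vector : List Int) (index_dict : List (String × Int)) : Prop :=
  vector = [] ∧ ∀ p ∈ index_dict, p.1 ≠ "[]"
instance (vector : List Int) (index_dict : List (String × Int)) : Decidable (Raises_lower_dimensions_index vector index_dict) := by unfold Raises_lower_dimensions_index; infer_instance

def pvRaiseWitness_lower_dimensions_index : List Int × (List (String × Int)) := ([], [])
def pvRaiseWitnessOut_lower_dimensions_index : List (String × Int) := [("[]", 0)]

def Spec_lower_dimensions_index (vector : List Int) (index_dict : List (String × Int)) (out : List (String × Int)) : Prop := out = lower_dimensions_index_alt vector index_dict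
instance (vector : List Int) (index_dict : List (String × Int)) (out : List (String × Int)) : Decidable (Spec_lower_dimensions_index vector index_dict out) := by unfold Spec_lower_dimensions_index; infer_instance

-- ===== CLAIM (what is proved, stated in full; the proofs are below) =====
def Claim_equal_lower_dimensions_index : Prop := ∀ (vector : List Int) (index_dict : List (String × Int)), Dom_lower_dimensions_index vector index_dict → Pre_lower_dimensions_index vector index_dict → Spec_lower_dimensions_index vector index_dict (lower_dimensions_index vector index_dict)

def Claim_raises_lower_dimensions_index : Prop := (∀ (vector : List Int) (index_dict : List (String × Int)), Dom_lower_dimensions_index vector index_dict → Raises_lower_dimensions_index vector index_dict → ¬ Pre_lower_dimensions_index vector index_dict) ∧ (Dom_lower_dimensions_index (pvRaiseWitness_lower_dimensions_index.1) (pvRaiseWitness_lower_dimensions_index.2) ∧ Raises_lower_dimensions_index (pvRaiseWitness_lower_dimensions_index.1) (pvRaiseWitness_lower_dimensions_index.2) ∧ lower_dimensions_index_alt (pvRaiseWitness_lower_dimensions_index.1) (pvRaiseWitness_lower_dimensions_index.2) = pvRaiseWitnessOut_lower_dimensions_index)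

-- ===== LEMMAS AND PROOFS =====

-- the push loop builds exactly A's combinations list (filtered to length > 1) on top of the stack
theorem pushChildren_eq (v : List Int) (st : List (List Int × Bool)) :
    pushChildren v st =
      ((csA v).filter (fun c => decide (c.length > 1))).map (fun c => (c, false)) ++ st := by
  unfold pushChildren csA
  have key : ∀ (l : List Nat) (st : List (List Int × Bool)),
      l.foldl (fun st i =>
        if (v.take i ++ v.drop (i + 1)).length > 1 then (v.take i ++ v.drop (i + 1), false) :: st
        else st) st
      = (((l.map (fun i => v.take i ++ v.drop (i + 1))).filter
            (fun c => decide (c.length > 1))).reverse.map (fun c => (c, false))) ++ st := by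
    intro l
    induction l with
    | nil => intro st; simp
    | cons i l ih =>
      intro st
      simp only [List.foldl_cons, List.map_cons, List.filter_cons]
      by_cases h : (v.take i ++ v.drop (i + 1)).length > 1
      · rw [if_pos h, ih, if_pos (by simpa using h)]
        simp
      · rw [if_neg h, ih, if_neg (by simpa using h)]
  rw [key, List.filter_reverse]

theorem children_length (v : List Int) (c : List Int) (h : c ∈ csA v) :
    c.length = v.length - 1 := by
  unfold csA at h
  rw [List.mem_reverse, List.mem_map] at h
  obtain ⟨i, hi, rfl⟩ := h
  rw [List.mem_range] at hi
  simp [List.length_take, List.length_drop]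
  omega

-- B's stack loop simulates A's recursion: processing (v, false) on top of the stack produces A's
-- result for v, with the rest of the stack untouched.
theorem B_simulates_A : ∀ (n : Nat) (v : List Int), v.length = n →
    ∀ (rest : List (List Int × Bool)) (d : List (String × Int)),
      B_loop ((v, false) :: rest) d = B_loop rest (A_core n v d) := by
  intro n
  induction n with
  | zero =>
    intro v hv rest d
    have hnil : v = [] := List.length_eq_zero_iff.mp hv
    subst hnil
    rw [B_loop]
    by_cases h : dMem d (pyStr []) = true
    · rw [if_pos h]
      simp only [A_core]
      rw [if_pos h]
    · rw [if_neg h]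
      simp only [A_core]
      rw [if_neg h]
      rw [show ∀ st, pushChildren ([] : List Int) st = st from fun _ => rfl]
      rw [B_loop]
  | succ n ih =>
    intro v hv rest d
    rw [B_loop]
    by_cases h : dMem d (pyStr v) = true
    · rw [if_pos h]
      simp only [A_core]
      rw [if_pos h]
    · rw [if_neg h]
      simp only [A_core]
      rw [if_neg h]
      rw [pushChildren_eq]
      have loop : ∀ (cs : List (List Int)), (∀ c ∈ cs, c.length = n) →
          ∀ (rest : List (List Int × Bool)) (d : List (String × Int)),
            B_loop ((cs.filter (fun c => decide (c.length > 1))).map (fun c => (c, false)) ++ rest) d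
              = B_loop rest (cs.foldl (fun acc lv => if lv.length > 1 then A_core n lv acc else acc) d) := by
        intro cs
        induction cs with
        | nil => intro _ rest d; simp
        | cons c cs ihc =>
          intro hlen rest d
          have hc : c.length = n := hlen c (by simp)
          have hrest : ∀ c' ∈ cs, c'.length = n := fun c' h' => hlen c' (by simp [h'])
          simp only [List.filter_cons, List.foldl_cons]
          by_cases hgt : c.length > 1
          · simp only [hgt, decide_true, if_pos, List.map_cons, List.cons_append]
            rw [ih c hc, ihc hrest]
          · simp [hgt, ihc hrest]
      have hcs : ∀ c ∈ csA v, c.length = n := by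
        intro c hc
        rw [children_length v c hc, hv]
        omega
      rw [loop (csA v) hcs, B_loop]

-- ===== VERDICT (by name: the statement is the Claim_ definition above) =====
theorem lower_dimensions_index_spec : Claim_equal_lower_dimensions_index := by
  intro vector index_dict _ _
  unfold Spec_lower_dimensions_index lower_dimensions_index lower_dimensions_index_alt
  rw [B_simulates_A vector.length vector rfl [] index_dict, B_loop]

theorem lower_dimensions_index_raises : Claim_raises_lower_dimensions_index := by
  unfold Claim_raises_lower_dimensions_index
  constructor
  · intro vector index_dict _ hr hp
    obtain ⟨rfl, hall⟩ := hr
    rcases hp with h | ⟨p, hp, hpeq⟩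
    · exact h rfl
    · exact hall p hp hpeq
  · refine ⟨by decide, by decide, ?_⟩
    unfold lower_dimensions_index_alt pvRaiseWitness_lower_dimensions_index pvRaiseWitnessOut_lower_dimensions_index
    rw [B_loop]
    have hm : dMem [] (pyStr []) = false := by decide
    rw [if_neg (by simp [hm])]
    rw [show ∀ st, pushChildren ([] : List Int) st = st from fun _ => rfl]
    rw [B_loop, B_loop]
    decide

-- self-check that the crash-fix witness output literal is B's actual value at the raise witness
theorem pvRaiseWitness_ok : lower_dimensions_index_alt [] [] = [("[]", 0)] :=
  lower_dimensions_index_raises.2.2.2
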